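-- pv_equiv track=rewrite | github.com/greentopsecret/code-challenges | hackerrank/flipping-the-matrix.py | solution
-- ===== SOURCE A (Python) =====
-- def solution(matrix: list[list[int]]) -> int:
--     n = int(len(matrix) / 2)
--     total = 0
--     for r in range(n):
--         for c in range(n):
--             total += max(
--                 matrix[r][c],
--                 matrix[r][2 * n - c - 1],
--                 matrix[2 * n - r - 1][2 * n - c - 1],
--                 matrix[2 * n - r - 1][c],
--             )
--
--     return total
-- ===== SOURCE B (Python) =====
-- def solution(matrix: list[list[int]]) -> int:
--     # Scatter pass: fold every cell of the full 2n x 2n matrix into a table of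
--     # running maxima keyed by its representative top-left quadrant position,
--     # then sum the table's values.
--     n = len(matrix) // 2
--     best = {}
--     for i in range(2 * n):
--         for j in range(2 * n):
--             v = matrix[i][j]
--             k = (min(i, 2 * n - 1 - i), min(j, 2 * n - 1 - j))
--             best[k] = max(best.get(k, v), v)
--     return sum(best.values())
-- ===== Notes on version B (the rewrite author's own statement) =====
-- stated objective: alternative
-- what changed: Replaced A's gather (for each quadrant cell, fetch its four mirror cells and add their max) by a scatter: one pass over every cell of the full 2n x 2n matrix that maps the cell to its representative quadrant key and accumulates running maxima in a dict, followed by summing the dict's values.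
import Mathlib
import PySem

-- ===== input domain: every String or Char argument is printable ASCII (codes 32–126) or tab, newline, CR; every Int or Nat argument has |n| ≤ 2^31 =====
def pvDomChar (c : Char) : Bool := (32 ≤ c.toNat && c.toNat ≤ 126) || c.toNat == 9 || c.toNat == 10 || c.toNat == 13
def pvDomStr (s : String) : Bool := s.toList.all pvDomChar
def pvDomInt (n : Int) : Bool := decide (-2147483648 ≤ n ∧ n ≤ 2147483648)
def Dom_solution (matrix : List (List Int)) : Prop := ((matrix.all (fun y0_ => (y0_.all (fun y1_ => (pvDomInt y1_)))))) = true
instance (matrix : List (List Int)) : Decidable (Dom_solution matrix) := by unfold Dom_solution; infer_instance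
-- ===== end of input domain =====

-- B replaces A's gather (per quadrant cell, take the max of its four mirror cells) by a scatter:
-- one pass over every cell of the full 2n x 2n matrix accumulating running maxima in a dict keyed
-- by the cell's representative quadrant position, then a sum of the dict's values
-- (objective: alternative; same asymptotic cost).

-- ===== PORT A =====
def solution (matrix : List (List Int)) : Int :=
  -- int(len(matrix)/2): exact true division of the nonnegative length then truncation = len // 2
  let n : Int := PySem.Int.floordiv (matrix.length : Int) 2
  (PySem.List.pyRange 0 n 1).foldl (fun total r =>
    (PySem.List.pyRange 0 n 1).foldl (fun total c =>
      total + max (max (max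
          (PySem.List.pyGetD (PySem.List.pyGetD matrix r []) c 0)
          (PySem.List.pyGetD (PySem.List.pyGetD matrix r []) (2 * n - c - 1) 0))
          (PySem.List.pyGetD (PySem.List.pyGetD matrix (2 * n - r - 1) []) (2 * n - c - 1) 0))
          (PySem.List.pyGetD (PySem.List.pyGetD matrix (2 * n - r - 1) []) c 0)) total) 0

-- ===== PORT B =====
def solution_alt (matrix : List (List Int)) : Int :=
  let n : Int := PySem.Int.floordiv (matrix.length : Int) 2
  let best : PySem.Dict (Int × Int) Int :=
    (PySem.List.pyRange 0 (2 * n) 1).foldl (fun d i =>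
      (PySem.List.pyRange 0 (2 * n) 1).foldl (fun d j =>
        let v := PySem.List.pyGetD (PySem.List.pyGetD matrix i []) j 0
        let k := (min i (2 * n - 1 - i), min j (2 * n - 1 - j))
        d.insert k (max (d.getD k v) v)) d) PySem.Dict.empty
  best.values.sum

-- ===== PRECONDITION & SPEC =====
-- Exactly where the Python A returns: each of the first 2*(len//2) rows must have at least
-- 2*(len//2) entries; otherwise A (and B) raises IndexError on a column access.
def Pre_solution (matrix : List (List Int)) : Prop :=
  ∀ row ∈ matrix.take (2 * (matrix.length / 2)), 2 * (matrix.length / 2) ≤ row.length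
instance (matrix : List (List Int)) : Decidable (Pre_solution matrix) := by unfold Pre_solution; infer_instance
def pvWitness_solution : List (List Int) := [[112, 42, 83, 119], [56, 125, 56, 49], [15, 78, 101, 43], [62, 98, 114, 108]]

def Spec_solution (matrix : List (List Int)) (out : Int) : Prop := out = solution_alt matrix
instance (matrix : List (List Int)) (out : Int) : Decidable (Spec_solution matrix out) := by unfold Spec_solution; infer_instance

-- ===== CLAIM (what is proved, stated in full; the proofs are below) =====
def Claim_equal_solution : Prop := ∀ (matrix : List (List Int)), Dom_solution matrix → Pre_solution matrix → Spec_solution matrix (solution matrix)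

-- ===== LEMMAS AND PROOFS =====

-- the common normal form both ports are reduced to
def pvCell (matrix : List (List Int)) (i j : Nat) : Int := (matrix.getD i []).getD j 0

def pvSum (matrix : List (List Int)) (n : Nat) : Int :=
  ((List.range n).map (fun r =>
    ((List.range n).map (fun c =>
      max (max (pvCell matrix r c) (pvCell matrix r (2 * n - c - 1)))
          (max (pvCell matrix (2 * n - r - 1) c) (pvCell matrix (2 * n - r - 1) (2 * n - c - 1))))).sum)).sum

-- B-side abstract objects: flat cell list, key/value maps, fold step, quadrant grid
def pvKey (n : Nat) (p : Nat × Nat) : Int × Int :=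
  (((min p.1 (2 * n - p.1 - 1) : Nat) : Int), ((min p.2 (2 * n - p.2 - 1) : Nat) : Int))

def pvVal (matrix : List (List Int)) (p : Nat × Nat) : Int := pvCell matrix p.1 p.2

def pvCells (n : Nat) : List (Nat × Nat) :=
  (List.range (2 * n)).flatMap (fun i => (List.range (2 * n)).map (fun j => (i, j)))

def pvStep (matrix : List (List Int)) (n : Nat) (d : PySem.Dict (Int × Int) Int) (p : Nat × Nat) :
    PySem.Dict (Int × Int) Int :=
  d.insert (pvKey n p) (max (d.getD (pvKey n p) (pvVal matrix p)) (pvVal matrix p))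

def pvGridRow (n r : Nat) : List (Int × Int) :=
  (List.range n).map (fun (c : Nat) => (((r : Nat) : Int), ((c : Nat) : Int)))

def pvMergeMax (o : Option Int) (vs : List Int) : Option Int :=
  vs.foldl (fun o v => some (match o with | none => v | some w => max w v)) o

-- ---- generic list lemmas ----
lemma pv_foldl_flatMap {α β σ : Type} (l : List α) (g : α → List β) (f : σ → β → σ) (s : σ) :
    (l.flatMap g).foldl f s = l.foldl (fun s a => (g a).foldl f s) s := by
  induction l generalizing s with
  | nil => rfl
  | cons a l ih => simp [List.flatMap_cons, List.foldl_append, ih]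

lemma pv_filter_flatMap {α β : Type} (l : List α) (g : α → List β) (p : β → Bool) :
    (l.flatMap g).filter p = l.flatMap (fun a => (g a).filter p) := by
  induction l with
  | nil => rfl
  | cons a l ih => simp [List.flatMap_cons, List.filter_append, ih]

lemma pv_sum_flatMap {α : Type} (l : List α) (g : α → List Int) :
    (l.flatMap g).sum = (l.map (fun a => (g a).sum)).sum := by
  induction l with
  | nil => rfl
  | cons a l ih => simp [List.flatMap_cons, ih]

lemma pv_flatMap_congr {α β : Type} (l : List α) (f g : α → List β)
    (h : ∀ x ∈ l, f x = g x) : l.flatMap f = l.flatMap g := by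
  induction l with
  | nil => rfl
  | cons a l ih =>
    simp only [List.flatMap_cons]
    rw [h a (List.mem_cons_self), ih (fun x hx => h x (List.mem_cons_of_mem _ hx))]

lemma pv_flatMap_range_single {β : Type} (n r : Nat) (hr : r < n) (h : Nat → List β) :
    (List.range n).flatMap (fun i => if i = r then h i else []) = h r := by
  induction n with
  | zero => omega
  | succ m ih =>
    rw [List.range_succ, List.flatMap_append]
    simp only [List.flatMap_cons, List.flatMap_nil, List.append_nil]
    by_cases hrm : r = m
    · subst hrm
      rw [if_pos rfl]
      have hnil : (List.range r).flatMap (fun i => if i = r then h i else []) = [] := by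
        rw [List.flatMap_eq_nil_iff]
        intro i hi
        rw [List.mem_range] at hi
        rw [if_neg (by omega)]
      rw [hnil, List.nil_append]
    · rw [if_neg (fun hm => hrm hm.symm), List.append_nil]
      exact ih (by omega)

lemma pv_filter_range_single (n c : Nat) (hc : c < n) :
    (List.range n).filter (fun j => decide (j = c)) = [c] := by
  induction n with
  | zero => omega
  | succ m ih =>
    rw [List.range_succ, List.filter_append]
    by_cases hcm : c = m
    · subst hcm
      have hnil : (List.range c).filter (fun j => decide (j = c)) = [] := by
        rw [List.filter_eq_nil_iff]
        intro j hj
        rw [List.mem_range] at hj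
        simp only [decide_eq_true_eq]
        omega
      rw [hnil, List.nil_append]
      simp
    · have h2 : ([m].filter (fun j => decide (j = c))) = [] := by
        simp only [List.filter_cons, List.filter_nil]
        rw [if_neg (by simp; omega)]
      rw [h2, List.append_nil]
      exact ih (by omega)

-- the key equality as a Bool
lemma pv_keyBeq (n i j r c : Nat) :
    (pvKey n (i, j) == (((r : Nat) : Int), ((c : Nat) : Int))) =
      decide (min i (2 * n - i - 1) = r ∧ min j (2 * n - j - 1) = c) := by
  by_cases h : min i (2 * n - i - 1) = r ∧ min j (2 * n - j - 1) = c
  · have he : pvKey n (i, j) = (((r : Nat) : Int), ((c : Nat) : Int)) := by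
      show ((((min i (2 * n - i - 1) : Nat) : Int)), (((min j (2 * n - j - 1) : Nat) : Int)))
          = (((r : Nat) : Int), ((c : Nat) : Int))
      rw [h.1, h.2]
    simp [he, h]
  · have he : pvKey n (i, j) ≠ (((r : Nat) : Int), ((c : Nat) : Int)) := by
      intro heq
      apply h
      have h1 := congrArg Prod.fst heq
      have h2 := congrArg Prod.snd heq
      simp only [pvKey] at h1 h2
      exact ⟨by exact_mod_cast h1, by exact_mod_cast h2⟩
    simp [he, h]

-- ---- A reduced to the normal form ----
lemma A_eq_pvSum (matrix : List (List Int)) :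
    solution matrix = pvSum matrix (matrix.length / 2) := by
  have hf : PySem.Int.floordiv (matrix.length : Int) 2 = ((matrix.length / 2 : Nat) : Int) := by
    exact_mod_cast PySem.Int.floordiv_natCast matrix.length 2
  simp only [solution, pvSum, hf]
  set n := matrix.length / 2 with hn
  rw [PySem.List.pyRange_zero_nat]
  simp only [List.foldl_map, PySem.List.foldl_add, zero_add]
  refine congrArg List.sum (List.map_congr_left ?_)
  intro r hr
  rw [List.mem_range] at hr
  refine congrArg List.sum (List.map_congr_left ?_)
  intro c hc
  rw [List.mem_range] at hc
  have e1 : (2 * (n : Int) - (c : Int) - 1) = ((2 * n - c - 1 : Nat) : Int) := by omega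
  have e2 : (2 * (n : Int) - (r : Int) - 1) = ((2 * n - r - 1 : Nat) : Int) := by omega
  rw [e1, e2]
  simp only [PySem.List.pyGetD_natCast, pvCell]
  omega

-- ---- B's port is the pvStep fold over the flat cell list ----
lemma B_eq_fold (matrix : List (List Int)) :
    solution_alt matrix =
      ((pvCells (matrix.length / 2)).foldl (pvStep matrix (matrix.length / 2))
        PySem.Dict.empty).values.sum := by
  have hf : PySem.Int.floordiv (matrix.length : Int) 2 = ((matrix.length / 2 : Nat) : Int) := by
    exact_mod_cast PySem.Int.floordiv_natCast matrix.length 2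
  simp only [solution_alt, hf]
  set n := matrix.length / 2 with hn
  have h2 : 2 * ((n : Nat) : Int) = ((2 * n : Nat) : Int) := by push_cast; ring
  rw [h2, PySem.List.pyRange_zero_nat]
  simp only [List.foldl_map]
  congr 2
  rw [pvCells, pv_foldl_flatMap]
  apply PySem.List.foldl_congr_mem
  intro d i hi
  rw [List.mem_range] at hi
  rw [List.foldl_map]
  apply PySem.List.foldl_congr_mem
  intro d' j hj
  rw [List.mem_range] at hj
  have e1 : ((2 * n : Nat) : Int) - 1 - (i : Int) = ((2 * n - i - 1 : Nat) : Int) := by omega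
  have e2 : ((2 * n : Nat) : Int) - 1 - (j : Int) = ((2 * n - j - 1 : Nat) : Int) := by omega
  simp only [e1, e2, ← Nat.cast_min, PySem.List.pyGetD_natCast, pvStep, pvKey, pvVal, pvCell]

-- ---- get? after the fold = running max over the values whose cell has that key ----
lemma fold_get? (matrix : List (List Int)) (n : Nat) (l : List (Nat × Nat))
    (d : PySem.Dict (Int × Int) Int) (q : Int × Int) :
    (l.foldl (pvStep matrix n) d).get? q =
      pvMergeMax (d.get? q) ((l.filter (fun p => pvKey n p == q)).map (pvVal matrix)) := by
  induction l generalizing d with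
  | nil => rfl
  | cons a l ih =>
    simp only [List.foldl_cons, List.filter_cons]
    by_cases h : pvKey n a = q
    · rw [h]
      simp only [beq_self_eq_true, if_pos, List.map_cons]
      rw [ih]
      have hstep : (pvStep matrix n d a).get? q =
          some (max (d.getD q (pvVal matrix a)) (pvVal matrix a)) := by
        simp only [pvStep, h, PySem.Dict.get?_insert_self]
      rw [hstep]
      simp only [pvMergeMax, List.foldl_cons]
      congr 1
      rcases hg : d.get? q with _ | w
      · simp [PySem.Dict.getD_eq_get?_getD, hg]
      · simp [PySem.Dict.getD_eq_get?_getD, hg]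
    · have hb : (pvKey n a == q) = false := by simp [h]
      rw [hb]
      simp only [Bool.false_eq_true, if_neg, not_false_iff]
      rw [ih]
      congr 1
      simp only [pvStep]
      exact PySem.Dict.get?_insert_of_ne _ _ (fun hq => h hq.symm)

-- set.update adds nothing when everything is already present
lemma pv_update_of_subset {α : Type} [BEq α] [LawfulBEq α] (s : PySem.Set α) (l : List α)
    (h : ∀ x ∈ l, x ∈ s) : PySem.Set.update s l = s := by
  rw [PySem.Set.update_eq_append_filter]
  have hnil : (PySem.Set.ofList l).filter (fun y => !(PySem.Set.contains s y)) = [] := by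
    rw [List.filter_eq_nil_iff]
    intro y hy
    have hys : y ∈ s := h y ((PySem.Set.mem_ofList l y).mp hy)
    have hc : PySem.Set.contains s y = true := (PySem.Set.contains_iff s y).mpr hys
    simp [hys]
  rw [hnil, List.append_nil]

-- one full row of keys, split into the quadrant row and its mirrored duplicate
lemma pv_kRow_split (n i : Nat) (hi : i < 2 * n) :
    (List.range (2 * n)).map (fun j => pvKey n (i, j)) =
      pvGridRow n (min i (2 * n - i - 1)) ++
        (List.range n).map (fun t => (((min i (2 * n - i - 1) : Nat) : Int), ((n - 1 - t : Nat) : Int))) := by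
  have h2 : 2 * n = n + n := by ring
  rw [h2, List.range_add, List.map_append, List.map_map]
  simp only [pvGridRow]
  congr 1
  · refine List.map_congr_left ?_
    intro j hj
    rw [List.mem_range] at hj
    simp only [pvKey, Prod.mk.injEq, Nat.cast_inj]
    omega
  · refine List.map_congr_left ?_
    intro t ht
    rw [List.mem_range] at ht
    simp only [Function.comp, pvKey, Prod.mk.injEq, Nat.cast_inj]
    omega

lemma pv_nodup_gridRow (n r : Nat) : (pvGridRow n r).Nodup := by
  simp only [pvGridRow]
  refine List.Nodup.map ?_ List.nodup_range
  intro a b hab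
  simpa using congrArg Prod.snd hab

lemma pv_mem_grid (n k : Nat) (q : Int × Int) :
    q ∈ (List.range k).flatMap (pvGridRow n) ↔ ∃ r, r < k ∧ ∃ c, c < n ∧ q = ((r : Int), (c : Int)) := by
  simp only [List.mem_flatMap, List.mem_range]
  constructor
  · rintro ⟨r, hr, hq⟩
    simp only [pvGridRow, List.mem_map, List.mem_range] at hq
    obtain ⟨c, hc, rfl⟩ := hq
    exact ⟨r, hr, c, hc, rfl⟩
  · rintro ⟨r, hr, c, hc, rfl⟩
    refine ⟨r, hr, ?_⟩
    simp only [pvGridRow, List.mem_map, List.mem_range]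
    exact ⟨c, hc, rfl⟩

-- the ordered-distinct keys of the first m rows form the first (min m n) quadrant grid rows
lemma pv_ofList_kRows (n : Nat) :
    ∀ m, m ≤ 2 * n →
      PySem.Set.ofList ((List.range m).flatMap (fun i => (List.range (2 * n)).map (fun j => pvKey n (i, j)))) =
        (List.range (min m n)).flatMap (pvGridRow n) := by
  intro m
  induction m with
  | zero => intro _; simp [PySem.Set.ofList_nil]
  | succ m ih =>
    intro hm
    rw [List.range_succ, List.flatMap_append]
    simp only [List.flatMap_cons, List.flatMap_nil, List.append_nil]
    rw [PySem.Set.ofList_append, ih (by omega)]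
    rw [pv_kRow_split n m (by omega), PySem.Set.update_append]
    by_cases hmn : m < n
    · have hmin : min m n = m := by omega
      have hmin1 : min (m + 1) n = m + 1 := by omega
      have hrho : min m (2 * n - m - 1) = m := by omega
      rw [hmin, hrho]
      have hdisj : ∀ x ∈ pvGridRow n m, x ∉ (List.range m).flatMap (pvGridRow n) := by
        intro x hx hmem
        rw [pv_mem_grid] at hmem
        obtain ⟨r, hr, c, hc, rfl⟩ := hmem
        simp only [pvGridRow, List.mem_map, List.mem_range, Prod.mk.injEq, Nat.cast_inj] at hx
        obtain ⟨c', _, hm, _⟩ := hx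
        omega
      rw [PySem.Set.update_eq_append_of_disjoint _ _ (pv_nodup_gridRow n m) hdisj]
      have hsub : PySem.Set.update ((List.range m).flatMap (pvGridRow n) ++ pvGridRow n m)
          ((List.range n).map (fun t => (((m : Nat) : Int), ((n - 1 - t : Nat) : Int)))) =
          (List.range m).flatMap (pvGridRow n) ++ pvGridRow n m := by
        apply pv_update_of_subset
        intro x hx
        simp only [List.mem_map, List.mem_range] at hx
        obtain ⟨t, ht, rfl⟩ := hx
        refine List.mem_append_right _ ?_
        simp only [pvGridRow, List.mem_map, List.mem_range]
        exact ⟨n - 1 - t, by omega, rfl⟩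
      rw [hsub, hmin1, List.range_succ, List.flatMap_append]
      simp
    · have hmin : min m n = n := by omega
      have hmin1 : min (m + 1) n = n := by omega
      have hrho : min m (2 * n - m - 1) = 2 * n - m - 1 := by omega
      have hrlt : 2 * n - m - 1 < n := by omega
      rw [hmin, hmin1, hrho]
      have h1 : PySem.Set.update ((List.range n).flatMap (pvGridRow n)) (pvGridRow n (2 * n - m - 1)) =
          (List.range n).flatMap (pvGridRow n) := by
        apply pv_update_of_subset
        intro x hx
        simp only [pvGridRow, List.mem_map, List.mem_range] at hx
        obtain ⟨c, hc, rfl⟩ := hx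
        rw [pv_mem_grid]
        exact ⟨2 * n - m - 1, hrlt, c, hc, rfl⟩
      rw [h1]
      apply pv_update_of_subset
      intro x hx
      simp only [List.mem_map, List.mem_range] at hx
      obtain ⟨t, ht, rfl⟩ := hx
      rw [pv_mem_grid]
      exact ⟨2 * n - m - 1, hrlt, n - 1 - t, by omega, rfl⟩

-- keys of the fold: the quadrant grid in row-major order
lemma keys_fold (matrix : List (List Int)) (n : Nat) :
    ((pvCells n).foldl (pvStep matrix n) PySem.Dict.empty).keys = (List.range n).flatMap (pvGridRow n) := by
  show ((pvCells n).foldl (fun d p =>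
      d.insert (pvKey n p) (max (d.getD (pvKey n p) (pvVal matrix p)) (pvVal matrix p)))
      PySem.Dict.empty).keys = _
  rw [PySem.Dict.keys_foldl_insert_key (pvCells n) (pvKey n)
      (fun d p => max (d.getD (pvKey n p) (pvVal matrix p)) (pvVal matrix p)) PySem.Dict.empty]
  rw [PySem.Dict.keys_empty, PySem.Set.update_nil_left]
  have hmap : (pvCells n).map (pvKey n) =
      (List.range (2 * n)).flatMap (fun i => (List.range (2 * n)).map (fun j => pvKey n (i, j))) := by
    simp [pvCells, List.map_flatMap, List.map_map, Function.comp_def]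
  rw [hmap, pv_ofList_kRows n (2 * n) (le_refl _),
    min_eq_right (by omega : n ≤ 2 * n)]

lemma nodup_keys_fold (matrix : List (List Int)) (n : Nat) :
    ((pvCells n).foldl (pvStep matrix n) PySem.Dict.empty).keys.Nodup := by
  show ((pvCells n).foldl (fun d p =>
      d.insert (pvKey n p) (max (d.getD (pvKey n p) (pvVal matrix p)) (pvVal matrix p)))
      PySem.Dict.empty).keys.Nodup
  exact PySem.Dict.nodup_keys_foldl_insert_key (pvCells n) (pvKey n)
    (fun d p => max (d.getD (pvKey n p) (pvVal matrix p)) (pvVal matrix p))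
    PySem.Dict.empty PySem.Dict.nodup_keys_empty

-- the central columns selector
lemma pv_filter_cols (n c : Nat) (hc : c < n) :
    (List.range (2 * n)).filter (fun j => decide (min j (2 * n - j - 1) = c)) = [c, 2 * n - c - 1] := by
  have h2 : 2 * n = n + n := by ring
  rw [h2, List.range_add, List.filter_append, List.filter_map]
  have hfst : (List.range n).filter (fun j => decide (min j (n + n - j - 1) = c)) = [c] := by
    rw [List.filter_congr (fun j hj => ?_)]
    · exact pv_filter_range_single n c hc
    · rw [List.mem_range] at hj
      exact decide_eq_decide.mpr (by omega)
  have hsnd : (List.range n).filter ((fun j => decide (min j (n + n - j - 1) = c)) ∘ (fun x => n + x)) =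
      [n - 1 - c] := by
    rw [List.filter_congr (fun t ht => ?_)]
    · exact pv_filter_range_single n (n - 1 - c) (by omega)
    · rw [List.mem_range] at ht
      simp only [Function.comp]
      exact decide_eq_decide.mpr (by omega)
  rw [hfst, hsnd]
  simp only [List.map_cons, List.map_nil, List.singleton_append]
  have e : n + (n - 1 - c) = n + n - c - 1 := by omega
  rw [e]

-- the cells mapping to a given quadrant key are exactly its four mirrors
lemma filter_cells (n r c : Nat) (hr : r < n) (hc : c < n) :
    (pvCells n).filter (fun p => pvKey n p == ((r : Int), (c : Int))) =
      [(r, c), (r, 2 * n - c - 1), (2 * n - r - 1, c), (2 * n - r - 1, 2 * n - c - 1)] := by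
  rw [pvCells, pv_filter_flatMap]
  have hrow : ∀ i ∈ List.range (2 * n),
      ((List.range (2 * n)).map (fun j => (i, j))).filter (fun p => pvKey n p == ((r : Int), (c : Int))) =
        (if min i (2 * n - i - 1) = r then [(i, c), (i, 2 * n - c - 1)] else []) := by
    intro i hi
    rw [List.mem_range] at hi
    rw [List.filter_map]
    by_cases hA : min i (2 * n - i - 1) = r
    · rw [if_pos hA]
      have hfc : (List.range (2 * n)).filter
          ((fun p => pvKey n p == ((r : Int), (c : Int))) ∘ (fun j => (i, j))) = [c, 2 * n - c - 1] := by
        rw [List.filter_congr (fun j hj => ?_)]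
        · exact pv_filter_cols n c hc
        · simp only [Function.comp]
          rw [pv_keyBeq n i j r c]
          exact decide_eq_decide.mpr (by constructor <;> (intro h'; try exact ⟨hA, h'⟩) <;> exact h'.2)
      rw [hfc]
      rfl
    · rw [if_neg hA]
      have hnil : (List.range (2 * n)).filter
          ((fun p => pvKey n p == ((r : Int), (c : Int))) ∘ (fun j => (i, j))) = [] := by
        rw [List.filter_eq_nil_iff]
        intro j _
        simp only [Function.comp]
        rw [pv_keyBeq n i j r c]
        simp only [decide_eq_true_eq]
        exact fun h' => hA h'.1
      rw [hnil, List.map_nil]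
  rw [pv_flatMap_congr _ _ _ hrow]
  have h2 : 2 * n = n + n := by ring
  rw [h2, List.range_add, List.flatMap_append, List.flatMap_map]
  have hfst : (List.range n).flatMap (fun i => if min i (n + n - i - 1) = r
      then [(i, c), (i, n + n - c - 1)] else []) = [(r, c), (r, n + n - c - 1)] := by
    rw [pv_flatMap_congr _ _ (fun i => if i = r then [(i, c), (i, n + n - c - 1)] else []) ?_]
    · exact pv_flatMap_range_single n r hr _
    · intro i hi
      rw [List.mem_range] at hi
      show (if min i (n + n - i - 1) = r then [(i, c), (i, n + n - c - 1)] else []) =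
        if i = r then [(i, c), (i, n + n - c - 1)] else []
      by_cases h' : i = r
      · rw [if_pos (by omega), if_pos h']
      · rw [if_neg (by omega), if_neg h']
  have hsnd : (List.range n).flatMap (fun a => if min (n + a) (n + n - (n + a) - 1) = r
      then [(n + a, c), (n + a, n + n - c - 1)] else []) =
      [(n + (n - 1 - r), c), (n + (n - 1 - r), n + n - c - 1)] := by
    rw [pv_flatMap_congr _ _ (fun t => if t = n - 1 - r then [(n + t, c), (n + t, n + n - c - 1)] else []) ?_]
    · exact pv_flatMap_range_single n (n - 1 - r) (by omega) _
    · intro t ht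
      rw [List.mem_range] at ht
      show (if min (n + t) (n + n - (n + t) - 1) = r then [(n + t, c), (n + t, n + n - c - 1)] else []) =
        if t = n - 1 - r then [(n + t, c), (n + t, n + n - c - 1)] else []
      by_cases h' : t = n - 1 - r
      · rw [if_pos (by omega), if_pos h']
      · rw [if_neg (by omega), if_neg h']
  rw [hfst, hsnd]
  have e2 : n + (n - 1 - r) = n + n - r - 1 := by omega
  rw [e2]
  rfl

-- ---- B reduced to the normal form ----
lemma B_eq_pvSum (matrix : List (List Int)) :
    solution_alt matrix = pvSum matrix (matrix.length / 2) := by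
  rw [B_eq_fold]
  set n := matrix.length / 2 with hn
  set D := (pvCells n).foldl (pvStep matrix n) PySem.Dict.empty with hD
  rw [PySem.Dict.values_eq_map_keys _ (by rw [hD]; exact nodup_keys_fold matrix n) 0]
  have hkeys : D.keys = (List.range n).flatMap (pvGridRow n) := by
    rw [hD]; exact keys_fold matrix n
  rw [hkeys, List.map_flatMap, pv_sum_flatMap]
  unfold pvSum
  refine congrArg List.sum (List.map_congr_left ?_)
  intro r hr
  rw [List.mem_range] at hr
  have hrow : (pvGridRow n r).map (fun k => D.getD k 0) =
      (List.range n).map (fun (c : Nat) => D.getD (((r : Nat) : Int), ((c : Nat) : Int)) 0) := by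
    simp only [pvGridRow, List.map_map]
    rfl
  rw [hrow]
  refine congrArg List.sum (List.map_congr_left ?_)
  intro c hc
  rw [List.mem_range] at hc
  have hget : D.get? (((r : Nat) : Int), ((c : Nat) : Int)) =
      some (max (max (pvCell matrix r c) (pvCell matrix r (2 * n - c - 1)))
          (max (pvCell matrix (2 * n - r - 1) c) (pvCell matrix (2 * n - r - 1) (2 * n - c - 1)))) := by
    rw [hD, fold_get? matrix n _ _ _, PySem.Dict.get?_empty, filter_cells n r c hr hc]
    simp only [List.map_cons, List.map_nil, pvMergeMax, List.foldl_cons, List.foldl_nil, pvVal]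
    exact congrArg some (max_assoc _ _ _)
  rw [PySem.Dict.getD_eq_get?_getD, hget, Option.getD_some]

-- ===== VERDICT (by name: the statement is the Claim_ definition above) =====
theorem solution_spec : Claim_equal_solution := by
  intro matrix _ _
  unfold Spec_solution
  rw [A_eq_pvSum, B_eq_pvSum]
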